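-- pv_equiv track=rewrite | github.com/avilamowski/hyper_jade | ejemplos/ej1-2025-s2-p2-ej2/alu1.py | ordenar_conjunto
-- ===== SOURCE A (Python) =====
-- def ordenar_conjunto(producto, precio, disponibles, prod_v, cant_v):
--     productos_totales = []
--     disponibles_de_ellos = []
--     valor_precio = []
--     vendidos_de_ellos = []
--     for i in range(len(prod_v)):
--         for k in range(len(producto)):
--             if prod_v[i] == producto[k]:
--                 productos_totales.append(producto[k])
--                 disponibles_de_ellos.append(disponibles[k])
--                 valor_precio.append(precio[k])
--                 vendidos_de_ellos.append(cant_v[i])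
--             if prod_v[i] not in producto:
--                 prod_v[i] = 0
--     return productos_totales, disponibles_de_ellos, vendidos_de_ellos, valor_precio
-- ===== SOURCE B (Python) =====
-- # Same return value as A via a hash map name -> list of indices built once (O(n+m) instead of O(n*m)).
-- # Side effect intentionally not reproduced: A overwrites unmatched prod_v entries with 0 in place
-- # (only when producto is non-empty); B leaves prod_v untouched. Equivalence is about the return value.
-- def ordenar_conjunto(producto, precio, disponibles, prod_v, cant_v):
--     pos = {}
--     for k, name in enumerate(producto):
--         pos[name] = pos.get(name, []) + [k]
--     nombres, disp, vend, val = [], [], [], []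
--     for i, p in enumerate(prod_v):
--         for k in pos.get(p, []):
--             nombres.append(producto[k])
--             disp.append(disponibles[k])
--             vend.append(cant_v[i])
--             val.append(precio[k])
--     return nombres, disp, vend, val
-- ===== Notes on version B (the rewrite author's own statement) =====
-- stated objective: faster
-- what changed: Replaced the nested scan of producto for every sold item (plus a per-step 'in' membership scan) by a dict name->list-of-indices built once over producto, then a single pass over prod_v; B does not reproduce A's in-place overwrite of unmatched prod_v entries with 0 (return value is identical).
import Mathlib
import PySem

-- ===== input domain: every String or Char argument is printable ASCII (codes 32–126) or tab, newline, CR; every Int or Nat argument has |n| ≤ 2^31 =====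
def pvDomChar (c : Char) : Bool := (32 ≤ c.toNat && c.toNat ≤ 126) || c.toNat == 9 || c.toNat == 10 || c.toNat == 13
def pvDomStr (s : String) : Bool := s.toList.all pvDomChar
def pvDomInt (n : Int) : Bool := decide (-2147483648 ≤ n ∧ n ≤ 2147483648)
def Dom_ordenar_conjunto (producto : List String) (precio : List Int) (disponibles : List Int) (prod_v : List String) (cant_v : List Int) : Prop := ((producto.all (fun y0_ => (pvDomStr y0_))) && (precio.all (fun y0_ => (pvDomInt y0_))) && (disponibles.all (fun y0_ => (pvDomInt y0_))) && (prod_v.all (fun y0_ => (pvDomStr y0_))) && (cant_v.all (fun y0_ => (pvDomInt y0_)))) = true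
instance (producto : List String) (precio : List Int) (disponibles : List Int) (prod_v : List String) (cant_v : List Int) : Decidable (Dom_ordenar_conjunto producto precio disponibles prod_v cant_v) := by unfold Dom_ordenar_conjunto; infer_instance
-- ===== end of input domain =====

-- B replaces A's nested scans by a dict name -> indices built once, then one pass over prod_v (measured faster).
-- Python A mutates its argument prod_v in place (unmatched entries become 0) and B does not; the
-- equivalence proved here is about the RETURN value only, which that mutation never affects.
-- ===== PORT A =====
-- Helper = the body of A's inner k-loop for a fixed outer index i.
-- State: (vi, nombres, disponibles_de_ellos, vendidos_de_ellos, valor_precio), where vi models the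
-- current value of the cell prod_v[i]: 'none' stands for the int 0 that 'prod_v[i] = 0' writes,
-- which compares unequal to every string.  That cell is written only at iteration i and never read
-- by any other iteration, so threading this one local value is an exact model of the mutation's
-- effect on the RETURN value (the in-place change to the prod_v argument itself is a side effect
-- outside the value semantics of the port).
def pvStepA (producto : List String) (precio : List Int) (disponibles : List Int) (ci : Int)
    (s : Option String × List String × List Int × List Int × List Int) (k : Int) :
    Option String × List String × List Int × List Int × List Int :=
  let pk := PySem.List.pyGetD producto k ""
  let s1 :=
    if s.1 = some pk then
      (s.1, s.2.1 ++ [pk], s.2.2.1 ++ [PySem.List.pyGetD disponibles k 0],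
       s.2.2.2.1 ++ [ci], s.2.2.2.2 ++ [PySem.List.pyGetD precio k 0])
    else s
  if (match s1.1 with | none => true | some t => !(producto.contains t)) then (none, s1.2) else s1

def ordenar_conjunto (producto : List String) (precio : List Int) (disponibles : List Int) (prod_v : List String) (cant_v : List Int) : List String × List Int × List Int × List Int :=
  (PySem.List.pyRange 0 (prod_v.length : Int) 1).foldl
    (fun acc i =>
      ((PySem.List.pyRange 0 (producto.length : Int) 1).foldl
        (pvStepA producto precio disponibles (PySem.List.pyGetD cant_v i 0))
        (some (PySem.List.pyGetD prod_v i ""), acc)).2)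
    (([] : List String), ([] : List Int), ([] : List Int), ([] : List Int))

-- ===== PORT B =====
-- B: build once a dict name -> list of indices of producto, then one pass over prod_v.
def pvPos (producto : List String) : PySem.Dict String (List Int) :=
  ((PySem.List.enumerate producto).map (fun q => (q.2, q.1))).foldl
    (fun d p => d.modify p.1 [] (· ++ [p.2])) PySem.Dict.empty

def ordenar_conjunto_alt (producto : List String) (precio : List Int) (disponibles : List Int) (prod_v : List String) (cant_v : List Int) : List String × List Int × List Int × List Int :=
  let pos := pvPos producto
  (PySem.List.enumerate prod_v).foldl
    (fun acc ip =>
      (pos.getD ip.2 []).foldl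
        (fun a k =>
          (a.1 ++ [PySem.List.pyGetD producto k ""],
           a.2.1 ++ [PySem.List.pyGetD disponibles k 0],
           a.2.2.1 ++ [PySem.List.pyGetD cant_v ip.1 0],
           a.2.2.2 ++ [PySem.List.pyGetD precio k 0])) acc)
    (([] : List String), ([] : List Int), ([] : List Int), ([] : List Int))

-- ===== PRECONDITION & SPEC =====
-- Pre_: exactly the inputs on which Python A returns normally (the proof itself does not need it:
-- both ports are totalised with the same pyGetD defaults, so they agree even outside Pre_).  A raises IndexError iff some sold
-- name prod_v[i] matches some producto[k] with k out of range for disponibles/precio or i out of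
-- range for cant_v; nothing else is excluded.
def Pre_ordenar_conjunto (producto : List String) (precio : List Int) (disponibles : List Int) (prod_v : List String) (cant_v : List Int) : Prop :=
  ∀ i : Nat, i < prod_v.length → ∀ k : Nat, k < producto.length →
    prod_v.getD i "" = producto.getD k "" →
      k < disponibles.length ∧ k < precio.length ∧ i < cant_v.length
instance (producto : List String) (precio : List Int) (disponibles : List Int) (prod_v : List String) (cant_v : List Int) : Decidable (Pre_ordenar_conjunto producto precio disponibles prod_v cant_v) := by unfold Pre_ordenar_conjunto; infer_instance

def pvWitness_ordenar_conjunto : List String × List Int × List Int × List String × List Int :=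
  (["pan", "sal"], [10, 3], [7, 2], ["sal", "aji"], [1, 4])

def Spec_ordenar_conjunto (producto : List String) (precio : List Int) (disponibles : List Int) (prod_v : List String) (cant_v : List Int) (out : List String × List Int × List Int × List Int) : Prop := out = ordenar_conjunto_alt producto precio disponibles prod_v cant_v
instance (producto : List String) (precio : List Int) (disponibles : List Int) (prod_v : List String) (cant_v : List Int) (out : List String × List Int × List Int × List Int) : Decidable (Spec_ordenar_conjunto producto precio disponibles prod_v cant_v out) := by unfold Spec_ordenar_conjunto; infer_instance

-- ===== CLAIM (what is proved, stated in full; the proofs are below) =====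
def Claim_equal_ordenar_conjunto : Prop := ∀ (producto : List String) (precio : List Int) (disponibles : List Int) (prod_v : List String) (cant_v : List Int), Dom_ordenar_conjunto producto precio disponibles prod_v cant_v → Pre_ordenar_conjunto producto precio disponibles prod_v cant_v → Spec_ordenar_conjunto producto precio disponibles prod_v cant_v (ordenar_conjunto producto precio disponibles prod_v cant_v)

-- ===== LEMMAS AND PROOFS =====

-- generic fold that appends four mapped singletons = four appended maps
theorem pv_fold4 (g1 : Int → String) (g2 g3 g4 : Int → Int) (ks : List Int)
    (a : List String × List Int × List Int × List Int) :
    ks.foldl (fun a k => (a.1 ++ [g1 k], a.2.1 ++ [g2 k], a.2.2.1 ++ [g3 k], a.2.2.2 ++ [g4 k])) a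
      = (a.1 ++ ks.map g1, a.2.1 ++ ks.map g2, a.2.2.1 ++ ks.map g3, a.2.2.2 ++ ks.map g4) := by
  induction ks generalizing a with
  | nil => simp
  | cons k ks ih => simp [List.foldl_cons, ih]

-- once vi is none (the cell holds the int 0), the inner loop changes nothing
theorem pv_innerA_none (producto : List String) (precio disponibles : List Int) (ci : Int)
    (L : List Int) (a : List String × List Int × List Int × List Int) :
    L.foldl (pvStepA producto precio disponibles ci) (none, a) = (none, a) := by
  induction L with
  | nil => rfl
  | cons k L ih =>
    have h : pvStepA producto precio disponibles ci (none, a) k = (none, a) := by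
      simp [pvStepA]
    simp [List.foldl_cons, h, ih]

-- inner loop when the sold name IS in producto: vi stays, matching rows get appended
theorem pv_innerA_mem (producto : List String) (precio disponibles : List Int) (ci : Int)
    (p : String) (hp : producto.contains p = true)
    (L : List Int) (a : List String × List Int × List Int × List Int) :
    L.foldl (pvStepA producto precio disponibles ci) (some p, a)
      = (some p,
         a.1 ++ ((L.filter (fun k => decide (p = PySem.List.pyGetD producto k ""))).map
                  (fun k => PySem.List.pyGetD producto k "")),
         a.2.1 ++ ((L.filter (fun k => decide (p = PySem.List.pyGetD producto k ""))).map
                  (fun k => PySem.List.pyGetD disponibles k 0)),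
         a.2.2.1 ++ ((L.filter (fun k => decide (p = PySem.List.pyGetD producto k ""))).map
                  (fun _ => ci)),
         a.2.2.2 ++ ((L.filter (fun k => decide (p = PySem.List.pyGetD producto k ""))).map
                  (fun k => PySem.List.pyGetD precio k 0))) := by
  have hpm : p ∈ producto := by simpa using hp
  induction L generalizing a with
  | nil => simp
  | cons k L ih =>
    by_cases hk : p = PySem.List.pyGetD producto k ""
    · have hstep : pvStepA producto precio disponibles ci (some p, a) k
          = (some p, a.1 ++ [PySem.List.pyGetD producto k ""],
             a.2.1 ++ [PySem.List.pyGetD disponibles k 0],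
             a.2.2.1 ++ [ci], a.2.2.2 ++ [PySem.List.pyGetD precio k 0]) := by
        simp [pvStepA, ← hk, hpm]
      rw [List.foldl_cons, hstep, ih]
      simp [← hk, List.append_assoc]
    · have hstep : pvStepA producto precio disponibles ci (some p, a) k = (some p, a) := by
        simp [pvStepA, hk, hpm]
      rw [List.foldl_cons, hstep, ih]
      simp [hk]

-- inner loop when the sold name is NOT in producto: the cell becomes 0 but nothing is appended
theorem pv_innerA_notmem (producto : List String) (precio disponibles : List Int) (ci : Int)
    (p : String) (hp : producto.contains p = false)
    (L : List Int) (hL : ∀ k ∈ L, 0 ≤ k ∧ k < (producto.length : Int))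
    (a : List String × List Int × List Int × List Int) :
    (L.foldl (pvStepA producto precio disponibles ci) (some p, a)).2 = a := by
  cases L with
  | nil => rfl
  | cons k L =>
    have hk := hL k (by simp)
    have hmem : PySem.List.pyGetD producto k "" ∈ producto :=
      PySem.List.pyGetD_mem producto "" ⟨by omega, by omega⟩
    have hpm : p ∉ producto := by simpa using hp
    have hne : ¬ (p = PySem.List.pyGetD producto k "") := fun h => hpm (h ▸ hmem)
    have hstep : pvStepA producto precio disponibles ci (some p, a) k = (none, a) := by
      simp [pvStepA, hne, hpm]
    simp [List.foldl_cons, hstep, pv_innerA_none]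

-- the dict maps a name to exactly the ascending list of matching indices of producto
theorem pv_pos_getD (producto : List String) (p : String) :
    (pvPos producto).getD p []
      = (PySem.List.pyRange 0 (producto.length : Int) 1).filter
          (fun k => decide (p = PySem.List.pyGetD producto k "")) := by
  unfold pvPos
  rw [PySem.Dict.getD_foldl_modify_append]
  rw [PySem.List.enumerate_eq_map_pyRange producto ""]
  simp only [List.map_map, List.filter_map, PySem.Dict.getD_empty, List.nil_append,
    PySem.List.len_eq]
  refine Eq.trans (List.map_id'' (fun x => rfl) _)
    (List.filter_congr fun k hk => by
      by_cases h : PySem.List.pyGetD producto k "" = p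
      · simp [Function.comp_def, h]
      · have h2 : ¬ (p = PySem.List.pyGetD producto k "") := fun h' => h (Eq.symm h')
        simp [Function.comp_def, h, h2])

theorem ordenar_conjunto_eq (producto : List String) (precio disponibles : List Int)
    (prod_v : List String) (cant_v : List Int) :
    ordenar_conjunto producto precio disponibles prod_v cant_v
      = ordenar_conjunto_alt producto precio disponibles prod_v cant_v := by
  unfold ordenar_conjunto ordenar_conjunto_alt
  rw [PySem.List.enumerate_eq_map_pyRange prod_v "", List.foldl_map]
  simp only [PySem.List.len_eq]
  refine PySem.List.foldl_congr_mem _ _ _ _ ?_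
  intro acc i hi
  have hi' := (PySem.List.mem_pyRange_one).mp hi
  set p := PySem.List.pyGetD prod_v i "" with hpdef
  set ci := PySem.List.pyGetD cant_v i 0 with hcidef
  rw [pv_pos_getD, pv_fold4]
  by_cases hp : producto.contains p = true
  · rw [pv_innerA_mem producto precio disponibles ci p hp]
  · have hL : ∀ k ∈ PySem.List.pyRange 0 (producto.length : Int) 1,
        0 ≤ k ∧ k < (producto.length : Int) := by
      intro k hk; exact (PySem.List.mem_pyRange_one).mp hk
    have hF : (PySem.List.pyRange 0 (producto.length : Int) 1).filter
        (fun k => decide (p = PySem.List.pyGetD producto k "")) = [] := by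
      rw [List.filter_eq_nil_iff]
      intro k hk
      have hbk := hL k hk
      have hmem : PySem.List.pyGetD producto k "" ∈ producto :=
        PySem.List.pyGetD_mem producto "" ⟨by omega, by omega⟩
      simp only [decide_eq_true_eq]
      intro h
      have hpm : p ∈ producto := by rw [h]; exact hmem
      exact (by simpa using hp : ¬ p ∈ producto) hpm
    rw [pv_innerA_notmem producto precio disponibles ci p (by simp_all) _ hL, hF]
    simp

-- ===== VERDICT (by name: the statement is the Claim_ definition above) =====
theorem ordenar_conjunto_spec : Claim_equal_ordenar_conjunto := by
  intro producto precio disponibles prod_v cant_v _ _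
  exact ordenar_conjunto_eq producto precio disponibles prod_v cant_v
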